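-- pv_equiv track=rewrite | github.com/JuanTGit/practice | Hash Table/order.py | everyOcc
-- ===== SOURCE A (Python) =====
-- def everyOcc(S):
--     occurrence = {}
--     S = S.lower()
--
--     for length in range(1, len(S) + 1):
--         for i in range(len(S) - length + 1):
--             uniques = S[i:i + length]
--
--             if uniques.isalpha():
--                 if uniques in occurrence:
--                     occurrence[uniques] += 1
--                 else:
--                     occurrence[uniques] = 1
--
--     ordered_occurrence = sorted(occurrence.items(), key = lambda x: (-x[1], x[0]))
--
--     result = '\n'.join(f'{count}:{combination}' for combination, count in ordered_occurrence)
--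
--     return result
-- ===== SOURCE B (Python) =====
-- def everyOcc(S):
--     s = S.lower()
--     counts = {}
--     for i in range(len(s)):
--         j = i
--         while j < len(s) and s[j].isalpha():
--             j += 1
--             sub = s[i:j]
--             counts[sub] = counts.get(sub, 0) + 1
--     ordered = sorted(counts.items(), key=lambda x: (-x[1], x[0]))
--     return '\n'.join(f'{count}:{combination}' for combination, count in ordered)
-- ===== Notes on version B (the rewrite author's own statement) =====
-- stated objective: alternative
-- what changed: Instead of iterating substring lengths and re-testing every slice with isalpha, B scans start positions and extends each window one alphabetic character at a time, so the per-slice isalpha pass disappears and non-alphabetic regions are skipped immediately.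
import Mathlib
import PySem

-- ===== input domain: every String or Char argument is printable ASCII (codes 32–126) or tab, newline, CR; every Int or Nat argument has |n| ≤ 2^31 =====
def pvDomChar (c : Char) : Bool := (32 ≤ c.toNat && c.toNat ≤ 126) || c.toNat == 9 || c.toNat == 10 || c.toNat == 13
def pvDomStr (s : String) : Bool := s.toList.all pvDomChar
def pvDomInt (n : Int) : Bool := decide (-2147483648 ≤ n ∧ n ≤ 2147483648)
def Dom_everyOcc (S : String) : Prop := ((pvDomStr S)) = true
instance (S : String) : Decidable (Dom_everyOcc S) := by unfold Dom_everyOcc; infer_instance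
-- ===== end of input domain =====

-- B replaces A's length-major scan (every slice re-tested with isalpha) by a start-major scan
-- that grows each window one alphabetic character at a time (objective: alternative decomposition).

-- ===== PORT A =====
def everyOcc (S : String) : String :=
  let s := PySem.Str.lower S
  let occurrence : PySem.Dict String Int :=
    (PySem.List.pyRange 1 (PySem.Str.len s + 1)).foldl (fun d length =>
      (PySem.List.pyRange 0 (PySem.Str.len s - length + 1)).foldl (fun d i =>
        let uniques := PySem.Str.slice s (some i) (some (i + length))
        if PySem.Str.strIsalpha uniques then
          if d.contains uniques then d.insert uniques (d.getD uniques 0 + 1)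
          else d.insert uniques 1
        else d) d) PySem.Dict.empty
  let ordered := PySem.List.sorted2 occurrence.items (fun x => -x.2) (fun x => x.1)
  PySem.Str.join "\n" (ordered.map (fun x => PySem.Int.toStr x.2 ++ ":" ++ x.1))

-- ===== PORT B =====
-- inner `while j < len(s) and s[j].isalpha(): j += 1; sub = s[i:j]; counts[sub] = counts.get(sub,0)+1`
def everyOccGoB (s : String) (i j : Nat) (d : PySem.Dict String Int) : PySem.Dict String Int :=
  if h : j < s.toList.length then
    if PySem.Chars.isalpha (s.toList[j]'h) then
      -- sub = s[i:j] (after the j += 1), inlined at both uses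
      everyOccGoB s i (j + 1)
        (d.insert (PySem.Str.slice s (some (i : Int)) (some ((j : Int) + 1)))
          (d.getD (PySem.Str.slice s (some (i : Int)) (some ((j : Int) + 1))) 0 + 1))
    else d
  else d
termination_by s.toList.length - j
decreasing_by omega

def everyOcc_alt (S : String) : String :=
  let s := PySem.Str.lower S
  let counts : PySem.Dict String Int :=
    (PySem.List.pyRange 0 (PySem.Str.len s)).foldl
      (fun d i => everyOccGoB s i.toNat i.toNat d) PySem.Dict.empty
  let ordered := PySem.List.sorted2 counts.items (fun x => -x.2) (fun x => x.1)
  PySem.Str.join "\n" (ordered.map (fun x => PySem.Int.toStr x.2 ++ ":" ++ x.1))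

-- ===== PRECONDITION & SPEC =====
def Spec_everyOcc (S : String) (out : String) : Prop := out = everyOcc_alt S
instance (S : String) (out : String) : Decidable (Spec_everyOcc S out) := by unfold Spec_everyOcc; infer_instance

-- ===== CLAIM (what is proved, stated in full; the proofs are below) =====
def Claim_equal_everyOcc : Prop := ∀ (S : String), Dom_everyOcc S → Spec_everyOcc S (everyOcc S)

-- ===== LEMMAS AND PROOFS =====

-- the multiset of counted windows, as (start, stop) index pairs
def pvExt (cs : List Char) (i : Nat) : Nat := ((cs.drop i).takeWhile PySem.Chars.isalpha).length

def pvWin (s : String) (p : Nat × Nat) : String :=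
  PySem.Str.slice s (some (p.1 : Int)) (some (p.2 : Int))

def pvPA (cs : List Char) : List (Nat × Nat) :=
  (List.range cs.length).flatMap (fun k =>
    (((List.range (cs.length - k)).map (fun i => (i, i + k + 1))).filter
      (fun p : Nat × Nat => decide (p.2 - p.1 ≤ pvExt cs p.1))))

def pvPB (cs : List Char) : List (Nat × Nat) :=
  (List.range cs.length).flatMap (fun i =>
    (List.range (pvExt cs i)).map (fun t => (i, i + 1 + t)))

lemma pv_foldl_flatMap {α β γ : Type} (g : α → List β) (f : γ → β → γ) (l : List α) (init : γ) :
    List.foldl f init (l.flatMap g) = l.foldl (fun a x => (g x).foldl f a) init := by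
  induction l generalizing init with
  | nil => rfl
  | cons x t ih => simp [List.flatMap_cons, List.foldl_append, ih]

lemma pv_branch (d : PySem.Dict String Int) (u : String) :
    (if d.contains u then d.insert u (d.getD u 0 + 1) else d.insert u 1)
      = d.insert u (d.getD u 0 + 1) := by
  cases h : d.contains u with
  | true => simp
  | false => simp [PySem.Dict.getD_of_not_contains d 0 h]

lemma pv_take_all_iff {α : Type} (p : α → Bool) :
    ∀ (l : List α) (k : Nat), k ≤ l.length →
      (((l.take k).all p = true) ↔ k ≤ (l.takeWhile p).length) := by
  intro l
  induction l with
  | nil =>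
    intro k hk
    have hk0 : k = 0 := by simpa using hk
    subst hk0
    simp
  | cons c t ih =>
    intro k hk
    cases k with
    | zero => simp
    | succ k =>
      by_cases hc : p c
      · have := ih k (by simpa using hk)
        simp [List.take_succ_cons, hc, this]
      · simp [List.take_succ_cons, hc]

lemma pv_ext_le (cs : List Char) (i : Nat) : pvExt cs i ≤ cs.length - i := by
  have h := (List.takeWhile_prefix (l := cs.drop i) PySem.Chars.isalpha).length_le
  simpa [pvExt] using h

lemma pv_alpha_slice (s : String) (i k : Nat) (h : i + k + 1 ≤ s.toList.length) :
    PySem.Str.strIsalpha (pvWin s (i, i + k + 1)) = decide (k + 1 ≤ pvExt s.toList i) := by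
  have hcast : ((i + k + 1 : Nat) : Int) = (i : Int) + ((k + 1 : Nat) : Int) := by push_cast; ring
  have hslice : (pvWin s (i, i + k + 1)).toList = (s.toList.drop i).take (k + 1) := by
    simp only [pvWin, PySem.Str.toList_slice, PySem.Chars.slice_eq_listSlice]
    rw [PySem.List.slice_natCast]
    congr 1
    omega
  rw [PySem.Str.strIsalpha_eq, hslice]
  have hlen : ((s.toList.drop i).take (k + 1)).length = k + 1 := by
    simp only [List.length_take, List.length_drop]; omega
  have hne : ¬ ((s.toList.drop i).take (k + 1)).isEmpty := by
    rw [List.isEmpty_iff]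
    intro hnil
    rw [hnil] at hlen
    simp at hlen
  rw [PySem.Chars.strIsalpha]
  have hiff := pv_take_all_iff PySem.Chars.isalpha (s.toList.drop i) (k + 1)
    (by simp only [List.length_drop]; omega)
  rw [Bool.eq_iff_iff]
  simp only [Bool.and_eq_true, Bool.not_eq_true', decide_eq_true_eq]
  constructor
  · rintro ⟨-, hall⟩; exact (hiff.mp hall)
  · intro hle
    exact ⟨by simpa using hne, hiff.mpr hle⟩


lemma pv_flatMap_congr {α β : Type} {l : List α} {f g : α → List β}
    (h : ∀ a ∈ l, f a = g a) : l.flatMap f = l.flatMap g := by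
  induction l with
  | nil => rfl
  | cons x t ih =>
    simp only [List.flatMap_cons]
    rw [h x (by simp), ih (fun a ha => h a (by simp [ha]))]

-- A's enumerated window list, rewritten over Nat index pairs
lemma pv_LA_eq (s : String) :
    (PySem.List.pyRange 1 (PySem.Str.len s + 1)).flatMap (fun length =>
      ((PySem.List.pyRange 0 (PySem.Str.len s - length + 1)).map
        (fun i => PySem.Str.slice s (some i) (some (i + length)))).filter
          PySem.Str.strIsalpha)
    = (pvPA s.toList).map (pvWin s) := by
  rw [PySem.List.pyRange_one 1 (PySem.Str.len s + 1)]
  have h1 : (PySem.Str.len s + 1 - 1).toNat = s.toList.length := by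
    rw [PySem.Str.len_eq]; omega
  rw [h1, List.flatMap_map, pvPA, List.map_flatMap]
  apply pv_flatMap_congr
  intro k hk
  have hk' : k < s.toList.length := List.mem_range.mp hk
  rw [PySem.List.pyRange_one 0 (PySem.Str.len s - (1 + (k : Int)) + 1)]
  have h2 : (PySem.Str.len s - (1 + (k : Int)) + 1 - 0).toNat = s.toList.length - k := by
    rw [PySem.Str.len_eq]; omega
  rw [h2, List.map_map]
  have h3 : (List.range (s.toList.length - k)).map
      ((fun i => PySem.Str.slice s (some i) (some (i + (1 + (k : Int))))) ∘ (fun t : Nat => (0 : Int) + t))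
      = (List.range (s.toList.length - k)).map (fun t : Nat => pvWin s (t, t + k + 1)) := by
    apply List.map_congr_left
    intro t _
    simp only [Function.comp, pvWin]
    congr 2 <;> push_cast <;> ring
  rw [h3, List.filter_map, List.filter_map, List.map_map]
  have h4 : (List.range (s.toList.length - k)).filter
      (PySem.Str.strIsalpha ∘ fun t : Nat => pvWin s (t, t + k + 1))
      = (List.range (s.toList.length - k)).filter
        ((fun p : Nat × Nat => decide (p.2 - p.1 ≤ pvExt s.toList p.1)) ∘ (fun t : Nat => (t, t + k + 1))) := by
    apply List.filter_congr
    intro t ht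
    have ht' : t < s.toList.length - k := List.mem_range.mp ht
    have hb : t + k + 1 ≤ s.toList.length := by omega
    simp only [Function.comp]
    rw [pv_alpha_slice s t k hb]
    simp only [decide_eq_decide]
    omega
  rw [h4]
  rfl

-- A's dictionary is the counter of the windows enumerated length-major
lemma pv_dictA (s : String) :
    (PySem.List.pyRange 1 (PySem.Str.len s + 1)).foldl (fun d length =>
      (PySem.List.pyRange 0 (PySem.Str.len s - length + 1)).foldl (fun d i =>
        if PySem.Str.strIsalpha (PySem.Str.slice s (some i) (some (i + length))) then
          if d.contains (PySem.Str.slice s (some i) (some (i + length))) then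
            d.insert (PySem.Str.slice s (some i) (some (i + length)))
              (d.getD (PySem.Str.slice s (some i) (some (i + length))) 0 + 1)
          else d.insert (PySem.Str.slice s (some i) (some (i + length))) 1
        else d) d) PySem.Dict.empty
    = PySem.Dict.counter ((pvPA s.toList).map (pvWin s)) := by
  rw [← pv_LA_eq s, ← PySem.Dict.foldl_insert_getD_add_one_eq_counter,
    pv_foldl_flatMap]
  simp only [pv_branch]
  have hfun : (fun (d : PySem.Dict String Int) (length : Int) =>
      (PySem.List.pyRange 0 (PySem.Str.len s - length + 1)).foldl (fun d i =>
        if PySem.Str.strIsalpha (PySem.Str.slice s (some i) (some (i + length))) then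
          d.insert (PySem.Str.slice s (some i) (some (i + length)))
            (d.getD (PySem.Str.slice s (some i) (some (i + length))) 0 + 1)
        else d) d)
      = (fun (d : PySem.Dict String Int) (length : Int) =>
        (((PySem.List.pyRange 0 (PySem.Str.len s - length + 1)).map
          (fun i => PySem.Str.slice s (some i) (some (i + length)))).filter
            PySem.Str.strIsalpha).foldl (fun d x => d.insert x (d.getD x 0 + 1)) d) := by
    funext d length
    rw [List.foldl_filter, List.foldl_map]
  rw [hfun]

-- B's inner while-loop emits exactly the alphabetic extensions of the current window
lemma pv_goB (s : String) (i : Nat) : ∀ (fuel j : Nat) (d : PySem.Dict String Int),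
    s.toList.length - j ≤ fuel → i ≤ j →
    ((s.toList.drop i).take (j - i)).all PySem.Chars.isalpha = true →
    everyOccGoB s i j d
      = ((List.range (i + pvExt s.toList i - j)).map (fun t => pvWin s (i, j + 1 + t))).foldl
          (fun d u => d.insert u (d.getD u 0 + 1)) d := by
  intro fuel
  induction fuel with
  | zero =>
    intro j d hfuel hij _
    have hj : ¬ j < s.toList.length := by omega
    rw [everyOccGoB.eq_def, dif_neg hj]
    have h0 : i + pvExt s.toList i - j = 0 := by
      have := pv_ext_le s.toList i; omega
    rw [h0]
    rfl
  | succ fuel ih =>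
    intro j d hfuel hij hwin
    by_cases hj : j < s.toList.length
    · have hlen : j - i < (s.toList.drop i).length := by
        simp only [List.length_drop]; omega
      by_cases ha : PySem.Chars.isalpha (s.toList[j]'hj) = true
      · have hdropj : (s.toList.drop i)[j - i]'hlen = s.toList[j]'hj := by
          rw [List.getElem_drop]
          congr 1
          omega
        have hsub : j + 1 - i = (j - i) + 1 := by omega
        have hopt : (s.toList.drop i)[j - i]? = some (s.toList[j]'hj) := by
          rw [List.getElem?_eq_getElem hlen, hdropj]
        have hwin' : ((s.toList.drop i).take (j + 1 - i)).all PySem.Chars.isalpha = true := by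
          rw [hsub, List.take_add_one, List.all_append, hopt]
          simp only [Option.toList_some, List.all_cons, List.all_nil, Bool.and_true,
            Bool.and_eq_true]
          exact ⟨hwin, ha⟩
        have hext : j - i < pvExt s.toList i := by
          have h1 := (pv_take_all_iff PySem.Chars.isalpha (s.toList.drop i) (j + 1 - i)
            (by simp only [List.length_drop]; omega)).mp hwin'
          unfold pvExt
          omega
        rw [everyOccGoB.eq_def, dif_pos hj, if_pos ha,
          ih (j + 1) _ (by omega) (by omega) hwin']
        have hrange : i + pvExt s.toList i - j = (i + pvExt s.toList i - (j + 1)) + 1 := by omega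
        rw [hrange, List.range_succ_eq_map, List.map_cons, List.foldl_cons, List.map_map]
        have e1 : ((j + 1 + 0 : Nat) : Int) = (j : Int) + 1 := by push_cast; ring
        have e2 : pvWin s (i, j + 1 + 0) = PySem.Str.slice s (some (i : Int)) (some ((j : Int) + 1)) := by
          simp only [pvWin]
          rw [e1]
        rw [e2]
        congr 1
        apply List.map_congr_left
        intro t _
        simp only [Function.comp, pvWin]
        exact congrArg (fun z : Nat => PySem.Str.slice s (some (i : Int)) (some (z : Int))) (by omega)
      · rw [everyOccGoB.eq_def, dif_pos hj, if_neg ha]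
        have hstop : pvExt s.toList i ≤ j - i := by
          by_contra hc
          have h1 := (pv_take_all_iff PySem.Chars.isalpha (s.toList.drop i) (j + 1 - i)
            (by simp only [List.length_drop]; omega)).mpr (by unfold pvExt at hc; omega)
          have hidx : j - i < ((s.toList.drop i).take (j + 1 - i)).length := by
            simp only [List.length_take, List.length_drop]; omega
          have hmem : (s.toList.drop i)[j - i]'hlen ∈ (s.toList.drop i).take (j + 1 - i) := by
            have hm := List.getElem_mem hidx
            rwa [List.getElem_take] at hm
          have halpha := (List.all_eq_true.mp h1) _ hmem
          have hdropj : (s.toList.drop i)[j - i]'hlen = s.toList[j]'hj := by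
            rw [List.getElem_drop]
            congr 1
            omega
          rw [hdropj] at halpha
          exact ha halpha
        have h0 : i + pvExt s.toList i - j = 0 := by omega
        rw [h0]
        rfl
    · rw [everyOccGoB.eq_def, dif_neg hj]
      have h0 : i + pvExt s.toList i - j = 0 := by
        have := pv_ext_le s.toList i; omega
      rw [h0]
      rfl

-- B's dictionary is the counter of the windows enumerated start-major
lemma pv_dictB (s : String) :
    (PySem.List.pyRange 0 (PySem.Str.len s)).foldl
      (fun d i => everyOccGoB s i.toNat i.toNat d) PySem.Dict.empty
    = PySem.Dict.counter ((pvPB s.toList).map (pvWin s)) := by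
  rw [PySem.List.pyRange_one 0 (PySem.Str.len s)]
  have h1 : (PySem.Str.len s - 0).toNat = s.toList.length := by
    rw [PySem.Str.len_eq]; omega
  rw [h1, List.foldl_map]
  have hfun : (fun (d : PySem.Dict String Int) (k : Nat) =>
      everyOccGoB s ((0 : Int) + k).toNat ((0 : Int) + k).toNat d)
      = (fun (d : PySem.Dict String Int) (k : Nat) =>
        ((List.range (pvExt s.toList k)).map (fun t => pvWin s (k, k + 1 + t))).foldl
          (fun d u => d.insert u (d.getD u 0 + 1)) d) := by
    funext d k
    have hto : ((0 : Int) + k).toNat = k := by omega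
    rw [hto, pv_goB s k s.toList.length k d (by omega) (le_refl k)
      (by simp only [Nat.sub_self, List.take_zero, List.all_nil])]
    have hr : k + pvExt s.toList k - k = pvExt s.toList k := by omega
    rw [hr]
  rw [hfun]
  have hmap : (pvPB s.toList).map (pvWin s)
      = (List.range s.toList.length).flatMap
          (fun k => (List.range (pvExt s.toList k)).map (fun t => pvWin s (k, k + 1 + t))) := by
    rw [pvPB, List.map_flatMap]
    apply pv_flatMap_congr
    intro k _
    rw [List.map_map]
    rfl
  rw [← PySem.Dict.foldl_insert_getD_add_one_eq_counter, hmap, pv_foldl_flatMap]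

-- the two index-pair enumerations are permutations of each other
lemma pv_mem_PA (cs : List Char) (p : Nat × Nat) :
    p ∈ pvPA cs ↔ (p.1 < p.2 ∧ p.2 - p.1 ≤ pvExt cs p.1) := by
  obtain ⟨i, j⟩ := p
  show _ ↔ (i < j ∧ j - i ≤ pvExt cs i)
  rw [pvPA, List.mem_flatMap]
  constructor
  · rintro ⟨k, hk, hmem⟩
    rw [List.mem_filter] at hmem
    obtain ⟨hmap, hpred⟩ := hmem
    rw [List.mem_map] at hmap
    obtain ⟨i', hi', hpair⟩ := hmap
    rw [List.mem_range] at hi'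
    rw [Prod.mk.injEq] at hpair
    obtain ⟨h1, h2⟩ := hpair
    subst h1
    simp only [decide_eq_true_eq] at hpred
    exact ⟨by omega, hpred⟩
  · rintro ⟨hlt, hext⟩
    have hin : i < cs.length := by
      have h1 := pv_ext_le cs i
      omega
    have hjn : j ≤ cs.length := by
      have h1 := pv_ext_le cs i
      omega
    refine ⟨j - i - 1, List.mem_range.mpr (by omega), ?_⟩
    rw [List.mem_filter]
    constructor
    · rw [List.mem_map]
      exact ⟨i, List.mem_range.mpr (by omega), Prod.ext rfl (by omega)⟩
    · simp only [decide_eq_true_eq]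
      omega

lemma pv_mem_PB (cs : List Char) (p : Nat × Nat) :
    p ∈ pvPB cs ↔ (p.1 < p.2 ∧ p.2 - p.1 ≤ pvExt cs p.1) := by
  obtain ⟨i, j⟩ := p
  show _ ↔ (i < j ∧ j - i ≤ pvExt cs i)
  rw [pvPB, List.mem_flatMap]
  constructor
  · rintro ⟨i', hi', hmem⟩
    rw [List.mem_map] at hmem
    obtain ⟨t, ht, hpair⟩ := hmem
    rw [List.mem_range] at ht
    rw [Prod.mk.injEq] at hpair
    obtain ⟨h1, h2⟩ := hpair
    subst h1
    exact ⟨by omega, by omega⟩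
  · rintro ⟨hlt, hext⟩
    have hin : i < cs.length := by
      have h1 := pv_ext_le cs i
      omega
    refine ⟨i, List.mem_range.mpr hin, ?_⟩
    rw [List.mem_map]
    exact ⟨j - i - 1, List.mem_range.mpr (by omega), Prod.ext rfl (by omega)⟩

lemma pv_nodup_PA (cs : List Char) : (pvPA cs).Nodup := by
  rw [pvPA, List.nodup_flatMap]
  constructor
  · intro k _
    apply List.Nodup.filter
    apply List.Nodup.map _ List.nodup_range
    intro a b hab
    simpa using congrArg Prod.fst hab
  · have hpw := List.pairwise_lt_range (n := cs.length)
    apply hpw.imp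
    intro k1 k2 hk p hp1 hp2
    simp only [List.mem_filter, List.mem_map, List.mem_range] at hp1 hp2
    obtain ⟨⟨i1, -, h1⟩, -⟩ := hp1
    obtain ⟨⟨i2, -, h2⟩, -⟩ := hp2
    rw [Prod.ext_iff] at h1 h2
    obtain ⟨h1a, h1b⟩ := h1
    obtain ⟨h2a, h2b⟩ := h2
    simp only [] at h1a h1b h2a h2b
    omega

lemma pv_nodup_PB (cs : List Char) : (pvPB cs).Nodup := by
  rw [pvPB, List.nodup_flatMap]
  constructor
  · intro i _
    apply List.Nodup.map _ List.nodup_range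
    intro a b hab
    simpa using congrArg Prod.snd hab
  · have hpw := List.pairwise_lt_range (n := cs.length)
    apply hpw.imp
    intro i1 i2 hk p hp1 hp2
    simp only [List.mem_map, List.mem_range] at hp1 hp2
    obtain ⟨t1, -, h1⟩ := hp1
    obtain ⟨t2, -, h2⟩ := hp2
    rw [Prod.ext_iff] at h1 h2
    obtain ⟨h1a, -⟩ := h1
    obtain ⟨h2a, -⟩ := h2
    simp only [] at h1a h2a
    omega

lemma pv_perm (cs : List Char) : (pvPA cs).Perm (pvPB cs) := by
  rw [List.perm_ext_iff_of_nodup (pv_nodup_PA cs) (pv_nodup_PB cs)]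
  intro p
  rw [pv_mem_PA, pv_mem_PB]

-- Python's (-count, key) sort key, seen as one lexicographic key
lemma pv_lex_lt_iff (x y : Int) (u v : String) :
    toLex (x, u) < toLex (y, v) ↔ (x < y ∨ (x = y ∧ u < v)) :=
  Iff.trans Prod.Lex.lt_iff Iff.rfl

lemma pv_before_eq : (fun (a b : String × Int) =>
    (decide (-a.2 < -b.2) || (!decide (-b.2 < -a.2) && decide (a.1 < b.1))))
    = (fun (a b : String × Int) => decide (toLex (-a.2, a.1) < toLex (-b.2, b.1))) := by
  funext a b
  rw [Bool.eq_iff_iff]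
  simp only [Bool.or_eq_true, Bool.and_eq_true, Bool.not_eq_true', decide_eq_true_eq,
    decide_eq_false_iff_not]
  rw [pv_lex_lt_iff]
  constructor
  · rintro (h1 | ⟨h1, h2⟩)
    · exact Or.inl h1
    · by_cases hlt : -a.2 < -b.2
      · exact Or.inl hlt
      · exact Or.inr ⟨le_antisymm (not_lt.mp h1) (not_lt.mp hlt), h2⟩
  · rintro (h1 | ⟨h1, h2⟩)
    · exact Or.inl h1
    · refine Or.inr ⟨?_, h2⟩
      rw [h1]
      exact lt_irrefl _

lemma pv_sorted2_eq (xs : List (String × Int)) :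
    PySem.List.sorted2 xs (fun x => -x.2) (fun x => x.1)
      = PySem.List.sorted xs (fun x => toLex (-x.2, x.1)) := by
  calc PySem.List.sorted2 xs (fun x => -x.2) (fun x => x.1)
      = List.foldl (fun acc x => PySem.List.insertBy
          (fun (a b : String × Int) =>
            (decide (-a.2 < -b.2) || (!decide (-b.2 < -a.2) && decide (a.1 < b.1)))) x acc) [] xs := rfl
    _ = List.foldl (fun acc x => PySem.List.insertBy
          (fun (a b : String × Int) => decide (toLex (-a.2, a.1) < toLex (-b.2, b.1))) x acc) [] xs := by
          rw [pv_before_eq]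
    _ = PySem.List.sorted xs (fun x => toLex (-x.2, x.1)) := rfl

lemma pv_key_inj : Function.Injective (fun x : String × Int => toLex (-x.2, x.1)) := by
  intro a b h
  have h' := congrArg ofLex h
  rw [ofLex_toLex, ofLex_toLex] at h'
  rw [Prod.mk.injEq] at h'
  obtain ⟨h1, h2⟩ := h'
  exact Prod.ext h2 (by omega)

lemma pv_sorted_items (s : String) :
    PySem.List.sorted2 (PySem.Dict.counter ((pvPA s.toList).map (pvWin s))).items
      (fun x => -x.2) (fun x => x.1)
    = PySem.List.sorted2 (PySem.Dict.counter ((pvPB s.toList).map (pvWin s))).items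
      (fun x => -x.2) (fun x => x.1) := by
  have hLperm : ((pvPA s.toList).map (pvWin s)).Perm ((pvPB s.toList).map (pvWin s)) :=
    (pv_perm s.toList).map (pvWin s)
  have hset : (PySem.Set.ofList ((pvPA s.toList).map (pvWin s))).Perm
      (PySem.Set.ofList ((pvPB s.toList).map (pvWin s))) := by
    rw [List.perm_ext_iff_of_nodup (PySem.Set.nodup_ofList _) (PySem.Set.nodup_ofList _)]
    intro a
    rw [PySem.Set.mem_ofList, PySem.Set.mem_ofList]
    exact hLperm.mem_iff
  have hitems : (PySem.Dict.counter ((pvPA s.toList).map (pvWin s))).items.Perm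
      (PySem.Dict.counter ((pvPB s.toList).map (pvWin s))).items := by
    rw [PySem.Dict.items_counter, PySem.Dict.items_counter]
    have hcnt : (PySem.Set.ofList ((pvPB s.toList).map (pvWin s))).map
        (fun k => (k, (List.count k ((pvPB s.toList).map (pvWin s)) : Int)))
        = (PySem.Set.ofList ((pvPB s.toList).map (pvWin s))).map
          (fun k => (k, (List.count k ((pvPA s.toList).map (pvWin s)) : Int))) := by
      apply List.map_congr_left
      intro k _
      rw [hLperm.count_eq k]
    rw [hcnt]
    exact hset.map _
  rw [pv_sorted2_eq, pv_sorted2_eq]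
  exact PySem.List.sorted_eq_sorted_of_perm _ _ _ pv_key_inj hitems

-- ===== VERDICT (by name: the statement is the Claim_ definition above) =====
theorem everyOcc_spec : Claim_equal_everyOcc := by
  intro S _
  unfold Spec_everyOcc
  simp only [everyOcc, everyOcc_alt]
  rw [pv_dictA, pv_dictB, pv_sorted_items]
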